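-- pv_equiv track=rewrite | github.com/joeyagreco/FFWEBAPP | packages/Verifiers/LeagueDictVerifier.py | duplicateTeamNames
-- ===== SOURCE A (Python) =====
-- def duplicateTeamNames(years: dict) -> bool:
--     """
--     Returns a boolean of whether the given years dict has any years duplicate team names.
--     """
--     for year in years:
--         teamNames = []
--         for team in years[year]["teams"]:
--             teamNames.append(team["teamName"].lower().strip())
--         teamNamesSet = set(teamNames)
--         if len(teamNames) != len(teamNamesSet):
--             return True
--     return False
-- ===== SOURCE B (Python) =====
-- def duplicateTeamNames(years: dict) -> bool:
--     """
--     Returns a boolean of whether the given years dict has any years duplicate team names.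
--     Decomposition: a per-year predicate (sort normalized names, scan adjacent pairs)
--     lazily applied over the years with any().
--     """
--     def year_has_dup(teams):
--         names = sorted(t["teamName"].lower().strip() for t in teams)
--         return any(a == b for a, b in zip(names, names[1:]))
--     return any(year_has_dup(years[y]["teams"]) for y in years)
-- ===== Notes on version B (the rewrite author's own statement) =====
-- stated objective: alternative
-- what changed: B is decomposed into a per-year predicate that sorts the normalized names and scans adjacent pairs, applied lazily over the years with any(), instead of A's explicit loop building a list and comparing its length with a set's.
import Mathlib
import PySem

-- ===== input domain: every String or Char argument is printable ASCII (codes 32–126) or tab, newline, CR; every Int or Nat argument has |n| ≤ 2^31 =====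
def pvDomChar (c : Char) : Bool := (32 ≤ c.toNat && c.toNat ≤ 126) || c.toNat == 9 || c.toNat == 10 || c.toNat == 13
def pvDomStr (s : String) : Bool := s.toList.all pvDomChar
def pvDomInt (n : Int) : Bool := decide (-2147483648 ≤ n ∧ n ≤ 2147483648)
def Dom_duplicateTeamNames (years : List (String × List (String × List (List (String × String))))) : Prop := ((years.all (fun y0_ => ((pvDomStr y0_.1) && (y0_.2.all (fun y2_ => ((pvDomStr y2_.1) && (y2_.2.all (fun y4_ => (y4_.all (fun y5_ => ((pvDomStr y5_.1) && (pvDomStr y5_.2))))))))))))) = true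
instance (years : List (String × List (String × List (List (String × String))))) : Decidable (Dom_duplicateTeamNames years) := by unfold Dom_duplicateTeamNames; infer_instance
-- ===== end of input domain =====

-- B decomposes the check into a per-year predicate (sort the normalized names, scan adjacent
-- pairs) applied over the years with any(), instead of A's explicit loop with a set-size test
-- (alternative algorithm, not faster).

-- team["teamName"].lower().strip(), the normalization both Pythons share verbatim;
-- the none branch is Python's KeyError, excluded by Pre_
def normName (team : List (String × String)) : String :=
  match (PySem.Dict.mk team).get? "teamName" with
  | some s => PySem.Str.strip (PySem.Str.lower s)
  | none => ""

-- ===== PORT A =====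
def duplicateTeamNames (years : List (String × List (String × List (List (String × String))))) : Bool :=
  match years with
  | [] => false
  | (_, yd) :: rest =>
    match (PySem.Dict.mk yd).get? "teams" with
    | none => false  -- Python KeyError "teams"; excluded by Pre_
    | some teams =>
      let teamNames := teams.foldl (fun acc team => acc ++ [normName team]) []
      let teamNamesSet := PySem.Set.ofList teamNames
      if teamNames.length ≠ teamNamesSet.length then true
      else duplicateTeamNames rest

-- ===== PORT B =====
-- the zip(names, names[1:]) adjacent scan of Source B's year_has_dup
def hasAdjDup : List String → Bool
  | a :: b :: rest => (a == b) || hasAdjDup (b :: rest)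
  | _ => false

-- Source B's year_has_dup, taking the year's dict value
def yearHasDup (yd : List (String × List (List (String × String)))) : Bool :=
  match (PySem.Dict.mk yd).get? "teams" with
  | none => false  -- Python KeyError "teams"; excluded by Pre_
  | some teams => hasAdjDup (PySem.List.sorted (teams.map normName) (fun s => s) false)

def duplicateTeamNames_alt (years : List (String × List (String × List (List (String × String))))) : Bool :=
  years.any (fun p => yearHasDup p.2)

-- ===== PRECONDITION & SPEC =====
-- a year whose value has "teams" and whose every team has "teamName" (no KeyError while processing it)
def yearOk (p : String × List (String × List (List (String × String)))) : Bool :=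
  match (PySem.Dict.mk p.2).get? "teams" with
  | none => false
  | some teams => teams.all (fun team => ((PySem.Dict.mk team).get? "teamName").isSome)

-- a year holding two teams with the same normalized name
def yearDup (p : String × List (String × List (List (String × String)))) : Bool :=
  match (PySem.Dict.mk p.2).get? "teams" with
  | none => false
  | some teams => decide (¬ (teams.map normName).Nodup)

-- Pre_ is exactly the inputs on which Python A returns (no KeyError): either every year is
-- well-formed, or some well-formed prefix ends in a year with duplicate names (the loop returns
-- True there and never reaches the malformed remainder).
def Pre_duplicateTeamNames (years : List (String × List (String × List (List (String × String))))) : Prop :=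
  (years.all yearOk ||
    (List.range years.length).any (fun i =>
      ((years.take (i + 1)).all yearOk) && yearDup (years.getD i ("", [])))) = true
instance (years : List (String × List (String × List (List (String × String))))) : Decidable (Pre_duplicateTeamNames years) := by unfold Pre_duplicateTeamNames; infer_instance

def pvWitness_duplicateTeamNames : (List (String × List (String × List (List (String × String))))) :=
  [("2020", [("teams", [[("teamName", " A ")], [("teamName", "a")]])])]

def Spec_duplicateTeamNames (years : List (String × List (String × List (List (String × String))))) (out : Bool) : Prop := out = duplicateTeamNames_alt years
instance (years : List (String × List (String × List (List (String × String))))) (out : Bool) : Decidable (Spec_duplicateTeamNames years out) := by unfold Spec_duplicateTeamNames; infer_instance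

-- ===== CLAIM (what is proved, stated in full; the proofs are below) =====
def Claim_equal_duplicateTeamNames : Prop := ∀ (years : List (String × List (String × List (List (String × String))))), Dom_duplicateTeamNames years → Pre_duplicateTeamNames years → Spec_duplicateTeamNames years (duplicateTeamNames years)

-- ===== LEMMAS AND PROOFS =====

-- structurally recursive form of Pre_, used by the induction
def preRec : List (String × List (String × List (List (String × String)))) → Bool
  | [] => true
  | p :: rest => yearOk p && (yearDup p || preRec rest)

lemma pre_iff_preRec (years : List (String × List (String × List (List (String × String))))) :
    Pre_duplicateTeamNames years ↔ preRec years = true := by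
  induction years with
  | nil => simp [Pre_duplicateTeamNames, preRec]
  | cons p rest ih =>
    rw [show preRec (p :: rest) = (yearOk p && (yearDup p || preRec rest)) from rfl]
    unfold Pre_duplicateTeamNames at ih ⊢
    simp only [List.length_cons, List.range_succ_eq_map, List.all_cons, List.any_cons,
      List.any_map, Function.comp_def, Nat.succ_eq_add_one, List.take_zero, List.take_succ_cons,
      List.getD_cons_zero, List.getD_cons_succ, List.all_nil, Bool.and_true, Bool.or_eq_true,
      Bool.and_eq_true, List.any_eq_true, and_assoc] at ih ⊢
    constructor
    · rintro (⟨hp, hr⟩ | ⟨hp, hd⟩ | ⟨x, hx, hp, hq⟩)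
      · exact ⟨hp, Or.inr (ih.1 (Or.inl hr))⟩
      · exact ⟨hp, Or.inl hd⟩
      · exact ⟨hp, Or.inr (ih.1 (Or.inr ⟨x, hx, hq⟩))⟩
    · rintro ⟨hp, hd | hr⟩
      · exact Or.inr (Or.inl ⟨hp, hd⟩)
      · rcases ih.2 hr with hall | ⟨x, hx, hq⟩
        · exact Or.inl ⟨hp, hall⟩
        · exact Or.inr (Or.inr ⟨x, hx, hp, hq⟩)

lemma len_ofList_eq_iff (xs : List String) :
    (PySem.Set.ofList xs).length = xs.length ↔ xs.Nodup := by
  constructor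
  · intro h
    induction xs with
    | nil => exact List.nodup_nil
    | cons x xs ih =>
      rw [PySem.Set.ofList_cons] at h
      simp only [List.length_cons, PySem.Set.discard] at h
      by_cases hx : x ∈ xs
      · exfalso
        have hmem : x ∈ PySem.Set.ofList xs := (PySem.Set.mem_ofList xs x).2 hx
        have hlt : ((PySem.Set.ofList xs).filter (fun y => !y == x)).length < (PySem.Set.ofList xs).length := by
          apply List.length_filter_lt_length_iff_exists.2
          exact ⟨x, hmem, by simp⟩
        have := PySem.Set.length_ofList_le xs
        omega
      · have hfe : (PySem.Set.ofList xs).filter (fun y => !y == x) = PySem.Set.ofList xs := by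
          apply List.filter_eq_self.2
          intro y hy
          have : y ∈ xs := (PySem.Set.mem_ofList xs y).1 hy
          simp only [Bool.not_eq_true', beq_eq_false_iff_ne, ne_eq]
          exact fun e => hx (e ▸ this)
        rw [hfe] at h
        exact List.nodup_cons.2 ⟨hx, ih (by omega)⟩
  · intro h
    rw [PySem.Set.ofList_eq_self_of_nodup xs h]

lemma hasAdjDup_false_iff (l : List String) (h : l.Pairwise (· ≤ ·)) :
    hasAdjDup l = false ↔ l.Nodup := by
  induction l with
  | nil => simp [hasAdjDup]
  | cons a t ih =>
    cases t with
    | nil => simp [hasAdjDup]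
    | cons b r =>
      have hp := List.pairwise_cons.1 h
      have hp' := List.pairwise_cons.1 hp.2
      constructor
      · intro hf
        simp only [hasAdjDup, Bool.or_eq_false_iff, beq_eq_false_iff_ne, ne_eq] at hf
        have hnd : (b :: r).Nodup := (ih hp.2).1 hf.2
        refine List.nodup_cons.2 ⟨?_, hnd⟩
        intro hmem
        rcases List.mem_cons.1 hmem with rfl | hr
        · exact hf.1 rfl
        · have h1 : a ≤ b := hp.1 b (List.mem_cons_self ..)
          have h2 : b ≤ a := hp'.1 a hr
          exact hf.1 (le_antisymm h1 h2)
      · intro hnd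
        have := List.nodup_cons.1 hnd
        simp only [hasAdjDup, Bool.or_eq_false_iff, beq_eq_false_iff_ne, ne_eq]
        refine ⟨fun hab => this.1 (hab ▸ List.mem_cons_self ..), (ih hp.2).2 this.2⟩

lemma sorted_hasAdjDup_iff (ns : List String) :
    hasAdjDup (PySem.List.sorted ns (fun s => s) false) = true ↔ ¬ ns.Nodup := by
  have hperm : (PySem.List.sorted ns (fun s => s) false).Perm ns := PySem.List.sorted_perm ns _ false
  have hiff := hasAdjDup_false_iff _ (PySem.List.sorted_pairwise ns (fun s => s))
  constructor
  · intro h hn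
    rw [hiff.2 (hperm.nodup_iff.2 hn)] at h
    exact Bool.false_ne_true h
  · intro hn
    by_contra hc
    exact hn (hperm.nodup_iff.1 (hiff.1 (Bool.eq_false_iff.2 hc)))

lemma main_eq : ∀ (years : List (String × List (String × List (List (String × String))))),
    preRec years = true → duplicateTeamNames years = duplicateTeamNames_alt years := by
  intro years hpre
  induction years with
  | nil => rfl
  | cons p rest ih =>
    obtain ⟨y, yd⟩ := p
    simp only [preRec, Bool.and_eq_true, Bool.or_eq_true] at hpre
    obtain ⟨hok, hdr⟩ := hpre
    unfold duplicateTeamNames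
    rw [show duplicateTeamNames_alt ((y, yd) :: rest) = (yearHasDup yd || duplicateTeamNames_alt rest) by
      simp [duplicateTeamNames_alt]]
    cases hteams : (PySem.Dict.mk yd).get? "teams" with
    | none => simp [yearOk, hteams] at hok
    | some teams =>
      simp only [yearHasDup, hteams]
      have hnames : teams.foldl (fun acc team => acc ++ [normName team]) [] = teams.map normName := by
        rw [PySem.List.foldl_append_singleton_eq_map normName teams []]
        simp only [List.nil_append]
      rw [hnames]
      by_cases hnd : (teams.map normName).Nodup
      · have hA : ¬ (teams.map normName).length ≠ (PySem.Set.ofList (teams.map normName)).length := by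
          simp only [ne_eq, not_not]
          exact ((len_ofList_eq_iff (teams.map normName)).2 hnd).symm
        have hB : hasAdjDup (PySem.List.sorted (teams.map normName) (fun s => s) false) = false := by
          by_contra hc
          exact (sorted_hasAdjDup_iff (teams.map normName)).1 (Bool.not_eq_false _ ▸ hc) hnd
        rw [if_neg hA, hB, Bool.false_or]
        have hdup : yearDup (y, yd) = false := by
          simp [yearDup, hteams, hnd]
        rcases hdr with hd | hr
        · rw [hdup] at hd; exact absurd hd Bool.false_ne_true
        · exact ih hr
      · have hA : (teams.map normName).length ≠ (PySem.Set.ofList (teams.map normName)).length :=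
          fun h => hnd ((len_ofList_eq_iff (teams.map normName)).1 h.symm)
        rw [if_pos hA, (sorted_hasAdjDup_iff (teams.map normName)).2 hnd, Bool.true_or]

-- ===== VERDICT (by name: the statement is the Claim_ definition above) =====
theorem duplicateTeamNames_spec : Claim_equal_duplicateTeamNames := by
  intro years _ hpre
  exact main_eq years ((pre_iff_preRec years).1 hpre)
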